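-- pv_equiv track=rewrite | github.com/luciancah/TIL | PS/codetree/240523/최적의 십자 모양 폭발/best-cross-shape-bomb.py | push_grid
-- ===== SOURCE A (Python) =====
-- def push_grid(grid):
--     new_grid = []
--     for i in range(len(grid)):
--         temp_arr = []
--         count = 0
--         for j in range(len(grid)):
--             if grid[j][i] != -1:
--                 temp_arr.append(grid[j][i])
--                 count += 1
--
--         for _ in range(count, len(grid)):
--             temp_arr.insert(0, 0)
--
--         new_grid.append(temp_arr)
--     return list(map(list, zip(*new_grid)))
-- ===== SOURCE B (Python) =====
-- def push_grid(grid):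
--     n = len(grid)
--     result = [[0] * n for _ in range(n)]
--     for i in range(n):
--         w = n - 1
--         for j in range(n - 1, -1, -1):
--             v = grid[j][i]
--             if v != -1:
--                 result[w][i] = v
--                 w -= 1
--     return result
-- ===== Notes on version B (the rewrite author's own statement) =====
-- stated objective: alternative
-- what changed: B writes surviving values bottom-up with a per-column write pointer directly into a preallocated n*n zero grid, instead of A's build-column-lists, prepend zero padding, then transpose via zip(*...).
import Mathlib
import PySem

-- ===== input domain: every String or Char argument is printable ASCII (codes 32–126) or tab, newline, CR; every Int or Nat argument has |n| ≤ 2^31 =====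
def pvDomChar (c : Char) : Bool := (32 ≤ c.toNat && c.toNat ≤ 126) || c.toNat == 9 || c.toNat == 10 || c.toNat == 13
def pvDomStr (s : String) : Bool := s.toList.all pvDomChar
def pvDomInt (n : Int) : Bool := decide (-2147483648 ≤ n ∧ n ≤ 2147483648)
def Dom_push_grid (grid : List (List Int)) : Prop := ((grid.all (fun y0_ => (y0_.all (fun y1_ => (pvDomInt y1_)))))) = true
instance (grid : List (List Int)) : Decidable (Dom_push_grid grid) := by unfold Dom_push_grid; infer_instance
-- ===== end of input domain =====

-- B replaces A's column-lists + front padding + zip(*) transpose by a per-column bottom-up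
-- write pointer into a preallocated n×n zero grid (alternative decomposition, same cost).

-- ===== PORT A =====
-- list(map(list, zip(*new_grid))): zip stops as soon as some list is empty;
-- fuel = length of the first list is exact because zip also stops when IT empties.
def zipStarGo : Nat → List (List Int) → List (List Int)
  | 0, _ => []
  | fuel + 1, ls =>
    if ls.all (fun l => !l.isEmpty) then
      (ls.map (fun l => l.headI)) :: zipStarGo fuel (ls.map List.tail)
    else []

def zipStar (ls : List (List Int)) : List (List Int) :=
  match ls with
  | [] => []
  | l :: _ => zipStarGo l.length ls

def push_grid (grid : List (List Int)) : List (List Int) :=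
  let n := grid.length
  let new_grid := (List.range n).foldl (fun ng i =>
    let temp := (List.range n).foldl (fun acc j =>
      if (grid.getD j []).getD i 0 ≠ -1 then acc ++ [(grid.getD j []).getD i 0] else acc) []
    ng ++ [List.replicate (n - temp.length) 0 ++ temp]) []
  zipStar new_grid

-- ===== PORT B =====
-- result[w][i] = v (both indices are always in range under Pre_, so List.set is exact here)
def setCell (res : List (List Int)) (r c : Nat) (v : Int) : List (List Int) :=
  res.set r ((res.getD r []).set c v)

def push_grid_alt (grid : List (List Int)) : List (List Int) :=
  let n := grid.length
  let init := List.replicate n (List.replicate n (0 : Int))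
  (List.range n).foldl (fun res i =>
    ((List.range n).reverse.foldl (fun (st : List (List Int) × Nat) j =>
      if (grid.getD j []).getD i 0 ≠ -1 then
        (setCell st.1 st.2 i ((grid.getD j []).getD i 0), st.2 - 1)
      else st) (res, n - 1)).1) init

-- ===== PRECONDITION & SPEC =====
-- Pre_ excludes exactly the inputs where the Python A raises IndexError:
-- grid[j][i] is read for all i, j < len(grid), so every row must have length ≥ len(grid).
def Pre_push_grid (grid : List (List Int)) : Prop :=
  ∀ row ∈ grid, grid.length ≤ row.length
instance (grid : List (List Int)) : Decidable (Pre_push_grid grid) := by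
  unfold Pre_push_grid; infer_instance

def pvWitness_push_grid : List (List Int) := [[1, -1], [-1, 2]]

def Spec_push_grid (grid : List (List Int)) (out : List (List Int)) : Prop := out = push_grid_alt grid
instance (grid : List (List Int)) (out : List (List Int)) : Decidable (Spec_push_grid grid out) := by unfold Spec_push_grid; infer_instance

-- ===== CLAIM (what is proved, stated in full; the proofs are below) =====
def Claim_equal_push_grid : Prop := ∀ (grid : List (List Int)), Dom_push_grid grid → Pre_push_grid grid → Spec_push_grid grid (push_grid grid)

-- ===== LEMMAS AND PROOFS =====

-- the value grid[j][i] as both ports read it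
def pvVal (grid : List (List Int)) (i j : Nat) : Int := (grid.getD j []).getD i 0

-- surviving values of column i, top to bottom
def pvFilt (grid : List (List Int)) (n i : Nat) : List Int :=
  ((List.range n).filter (fun j => decide (pvVal grid i j ≠ -1))).map (pvVal grid i)

-- A's zero-padded column
def pvPad (grid : List (List Int)) (n i : Nat) : List Int :=
  List.replicate (n - (pvFilt grid n i).length) 0 ++ pvFilt grid n i

-- the common target grid, row by row
def pvTarget (grid : List (List Int)) (n : Nat) : List (List Int) :=
  (List.range n).map (fun r => (List.range n).map (fun i => (pvPad grid n i).getD r 0))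

-- B's inner loop, abstracted: write vs at rows w, w-1, … of column i
def pvWrite (i : Nat) : List (List Int) → Nat → List Int → List (List Int)
  | res, _, [] => res
  | res, w, v :: vs => pvWrite i (setCell res w i v) (w - 1) vs

-- B's outer-loop body
def pvStep (grid : List (List Int)) (n : Nat) (res : List (List Int)) (i : Nat) : List (List Int) :=
  ((List.range n).reverse.foldl (fun (st : List (List Int) × Nat) j =>
      if (grid.getD j []).getD i 0 ≠ -1 then
        (setCell st.1 st.2 i ((grid.getD j []).getD i 0), st.2 - 1)
      else st) (res, n - 1)).1

def get2 (res : List (List Int)) (r c : Nat) : Int := (res.getD r []).getD c 0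

-- invariant after B has processed the first m columns
def pvColOK (grid : List (List Int)) (n m : Nat) (res : List (List Int)) : Prop :=
  res.length = n ∧ (∀ row ∈ res, row.length = n) ∧
    ∀ r c : Nat, get2 res r c = if c < m then (pvPad grid n c).getD r 0 else 0

lemma foldl_app_if {α β : Type} (f : α → β) (p : α → Prop) [DecidablePred p] :
    ∀ (l : List α) (acc : List β),
      l.foldl (fun acc x => if p x then acc ++ [f x] else acc) acc
        = acc ++ (l.filter (fun x => decide (p x))).map f := by
  intro l
  induction l with
  | nil => simp
  | cons x xs ih =>
    intro acc
    by_cases h : p x <;> simp [List.foldl_cons, h, ih]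

lemma foldl_app_singleton {α β : Type} (f : α → β) :
    ∀ (l : List α) (acc : List β),
      l.foldl (fun acc x => acc ++ [f x]) acc = acc ++ l.map f := by
  intro l
  induction l with
  | nil => simp
  | cons x xs ih => intro acc; simp [List.foldl_cons, ih]

lemma pvFilt_len_le (grid : List (List Int)) (n i : Nat) :
    (pvFilt grid n i).length ≤ n := by
  unfold pvFilt
  rw [List.length_map]
  have h := List.length_filter_le (fun j => decide (pvVal grid i j ≠ -1)) (List.range n)
  simpa using h

lemma pvPad_len (grid : List (List Int)) (n i : Nat) :
    (pvPad grid n i).length = n := by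
  unfold pvPad
  rw [List.length_append, List.length_replicate]
  have := pvFilt_len_le grid n i
  omega

lemma pvPad_getD (grid : List (List Int)) (n i r : Nat) :
    (pvPad grid n i).getD r 0 =
      if n - (pvFilt grid n i).length ≤ r ∧ r < n then
        (pvFilt grid n i).getD (r - (n - (pvFilt grid n i).length)) 0
      else 0 := by
  have hk := pvFilt_len_le grid n i
  unfold pvPad
  simp only [List.getD_eq_getElem?_getD]
  by_cases hr : r < n
  · by_cases h1 : r < n - (pvFilt grid n i).length
    · rw [if_neg (by omega)]
      rw [List.getElem?_append_left (by simpa using h1)]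
      simp [h1]
    · rw [if_pos ⟨by omega, hr⟩]
      rw [List.getElem?_append_right (by simpa using (by omega : n - (pvFilt grid n i).length ≤ r))]
      simp
  · rw [if_neg (by omega)]
    rw [List.getElem?_eq_none (by simp [List.length_append]; omega)]
    simp

lemma zipStarGo_eq (n : Nat) :
    ∀ ls : List (List Int), ls ≠ [] → (∀ l ∈ ls, l.length = n) →
      zipStarGo n ls = (List.range n).map (fun r => ls.map (fun l => l.getD r 0)) := by
  induction n with
  | zero => intro ls _ _; simp [zipStarGo]
  | succ n ih =>
    intro ls hne hlen
    have hall : ls.all (fun l => !l.isEmpty) = true := by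
      rw [List.all_eq_true]
      intro l hl
      have hl' := hlen l hl
      cases l with
      | nil => simp at hl'
      | cons a as => simp
    rw [zipStarGo, if_pos hall]
    have htne : ls.map List.tail ≠ [] := by
      cases ls with
      | nil => exact absurd rfl hne
      | cons a as => simp
    have htlen : ∀ l ∈ ls.map List.tail, l.length = n := by
      intro l hl
      rcases List.mem_map.mp hl with ⟨l', hl', rfl⟩
      have := hlen l' hl'
      cases l' with
      | nil => simp at this
      | cons a as => simpa using this
    rw [ih _ htne htlen, List.range_succ_eq_map, List.map_cons, List.map_map]
    congr 1
    · apply List.map_congr_left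
      intro l hl
      have := hlen l hl
      cases l with
      | nil => simp at this
      | cons a as => simp
    · apply List.map_congr_left
      intro r _
      simp only [Function.comp_apply, List.map_map]
      apply List.map_congr_left
      intro l hl
      have := hlen l hl
      cases l with
      | nil => simp at this
      | cons a as => simp

lemma zipStar_map_pad (grid : List (List Int)) (n : Nat) :
    zipStar ((List.range n).map (fun i => pvPad grid n i)) = pvTarget grid n := by
  cases n with
  | zero => simp [zipStar, pvTarget]
  | succ m =>
    have hls : (List.range (m + 1)).map (fun i => pvPad grid (m + 1) i)
        = pvPad grid (m + 1) 0 ::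
            ((List.range m).map Nat.succ).map (fun i => pvPad grid (m + 1) i) := by
      rw [List.range_succ_eq_map, List.map_cons]
    rw [hls]
    rw [zipStar, pvPad_len, ← hls]
    rw [zipStarGo_eq (m + 1) _ (by rw [hls]; simp) ?hlen]
    case hlen =>
      intro l hl
      rcases List.mem_map.mp hl with ⟨i, _, rfl⟩
      exact pvPad_len grid (m + 1) i
    unfold pvTarget
    apply List.map_congr_left
    intro r _
    rw [List.map_map]
    rfl

lemma push_grid_eq_target (grid : List (List Int)) :
    push_grid grid = pvTarget grid grid.length := by
  have h1 : ∀ i : Nat, (List.range grid.length).foldl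
      (fun acc j => if (grid.getD j []).getD i 0 ≠ -1 then acc ++ [(grid.getD j []).getD i 0] else acc)
      ([] : List Int) = pvFilt grid grid.length i := by
    intro i
    rw [foldl_app_if (fun j => (grid.getD j []).getD i 0) (fun j => (grid.getD j []).getD i 0 ≠ -1)]
    simp [pvFilt, pvVal]
  simp only [push_grid, h1]
  rw [foldl_app_singleton
    (fun i => List.replicate (grid.length - (pvFilt grid grid.length i).length) 0 ++ pvFilt grid grid.length i)]
  rw [List.nil_append]
  exact zipStar_map_pad grid grid.length

lemma get2_setCell (res : List (List Int)) (w c0 : Nat) (v : Int)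
    (hw : w < res.length) (hc : c0 < (res.getD w []).length) (r c : Nat) :
    get2 (setCell res w c0 v) r c = if r = w ∧ c = c0 then v else get2 res r c := by
  have hrw : res.getD w [] = res[w] := List.getD_eq_getElem res [] hw
  rw [hrw] at hc
  unfold get2 setCell
  rw [hrw]
  by_cases hr : r = w
  · subst hr
    rw [List.getD_eq_getElem _ _ (show r < (res.set r (res[r].set c0 v)).length by
      rw [List.length_set]; exact hw)]
    rw [List.getElem_set_self (by rw [List.length_set]; exact hw)]
    by_cases hcc : c = c0
    · subst hcc
      rw [if_pos ⟨rfl, rfl⟩]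
      rw [List.getD_eq_getElem _ _ (show c < (res[r].set c v).length by
        rw [List.length_set]; exact hc)]
      rw [List.getElem_set_self (by rw [List.length_set]; exact hc)]
    · rw [if_neg (by tauto)]
      simp only [List.getD_eq_getElem?_getD]
      rw [List.getElem?_set_ne (Ne.symm hcc)]
      simp [List.getElem?_eq_getElem hw]
  · rw [if_neg (by tauto)]
    simp only [List.getD_eq_getElem?_getD]
    rw [List.getElem?_set_ne (fun h => hr h.symm)]

lemma pvWrite_length (i : Nat) :
    ∀ (vs : List Int) (res : List (List Int)) (w : Nat),
      (pvWrite i res w vs).length = res.length := by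
  intro vs
  induction vs with
  | nil => intro res w; rfl
  | cons v vs ih =>
    intro res w
    rw [pvWrite, ih]
    simp [setCell]

lemma pvWrite_rows (i n : Nat) :
    ∀ (vs : List Int) (res : List (List Int)) (w : Nat),
      w < res.length → (∀ row ∈ res, row.length = n) →
      ∀ row ∈ pvWrite i res w vs, row.length = n := by
  intro vs
  induction vs with
  | nil => intro res w _ hrow; exact hrow
  | cons v vs ih =>
    intro res w hw hrow
    rw [pvWrite]
    apply ih
    · simp [setCell]; omega
    · intro row hmem
      rcases List.mem_or_eq_of_mem_set hmem with h | h
      · exact hrow _ h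
      · subst h
        rw [List.length_set]
        exact hrow _ (by rw [List.getD_eq_getElem _ _ hw]; exact List.getElem_mem hw)

lemma write_get2 (i : Nat) :
    ∀ (vs : List Int) (res : List (List Int)) (w : Nat),
      vs.length ≤ w + 1 → w < res.length → (∀ row ∈ res, i < row.length) →
      ∀ r c, get2 (pvWrite i res w vs) r c =
        if c = i ∧ r ≤ w ∧ w - r < vs.length then vs.getD (w - r) 0 else get2 res r c := by
  intro vs
  induction vs with
  | nil =>
    intro res w _ _ _ r c
    simp [pvWrite]
  | cons v vs ih =>
    intro res w hlen hw hrow r c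
    rw [List.length_cons] at hlen
    have hcell : i < (res.getD w []).length := by
      rw [List.getD_eq_getElem _ _ hw]
      exact hrow _ (List.getElem_mem hw)
    have hrow' : ∀ row ∈ setCell res w i v, i < row.length := by
      intro row hmem
      rcases List.mem_or_eq_of_mem_set hmem with h | h
      · exact hrow _ h
      · subst h; rw [List.length_set]; exact hcell
    rw [pvWrite]
    rw [ih (setCell res w i v) (w - 1) (by omega)
      (by rw [show (setCell res w i v).length = res.length by simp [setCell]]; omega) hrow' r c]
    rw [get2_setCell res w i v hw hcell r c]
    simp only [List.length_cons]
    by_cases hc : c = i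
    · subst hc
      rcases Nat.lt_trichotomy r w with hlt | heq | hgt

      · have hwr : w - r = (w - 1 - r) + 1 := by omega
        by_cases hcond : w - 1 - r < vs.length
        · rw [if_pos ⟨rfl, by omega, hcond⟩, if_pos ⟨rfl, by omega, by omega⟩, hwr,
            List.getD_cons_succ]
        · rw [if_neg (by rintro ⟨-, -, h⟩; omega), if_neg (by rintro ⟨h, -⟩; omega),
            if_neg (by rintro ⟨-, -, h⟩; omega)]
      · subst heq
        rw [if_neg (by rintro ⟨-, h1, h2⟩; omega), if_pos ⟨rfl, rfl⟩,
          if_pos ⟨rfl, le_rfl, by omega⟩]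
        simp
      · rw [if_neg (by rintro ⟨-, h, -⟩; omega), if_neg (by rintro ⟨h, -⟩; omega),
          if_neg (by rintro ⟨-, h, -⟩; omega)]
    · rw [if_neg (by tauto), if_neg (by tauto), if_neg (by tauto)]

lemma inner_fold_eq (grid : List (List Int)) (i : Nat) :
    ∀ (js : List Nat) (res : List (List Int)) (w : Nat),
      js.foldl (fun (st : List (List Int) × Nat) j =>
          if (grid.getD j []).getD i 0 ≠ -1 then
            (setCell st.1 st.2 i ((grid.getD j []).getD i 0), st.2 - 1)
          else st) (res, w)
        = (pvWrite i res w ((js.filter (fun j => decide (pvVal grid i j ≠ -1))).map (pvVal grid i)),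
           w - ((js.filter (fun j => decide (pvVal grid i j ≠ -1))).map (pvVal grid i)).length) := by
  intro js
  induction js with
  | nil => intro res w; simp [pvWrite]
  | cons j js ih =>
    intro res w
    rw [List.foldl_cons]
    by_cases h : (grid.getD j []).getD i 0 ≠ -1
    · rw [if_pos h, ih]
      have hd : decide (pvVal grid i j ≠ -1) = true := by simpa [pvVal] using h
      rw [List.filter_cons, hd]
      simp only [if_true, List.map_cons, List.length_cons, pvWrite, pvVal, Prod.mk.injEq]
      exact ⟨trivial, by omega⟩
    · rw [if_neg h, ih]
      have hd : decide (pvVal grid i j ≠ -1) = false := by simpa [pvVal] using h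
      rw [List.filter_cons, hd]
      simp

lemma filt_reverse (grid : List (List Int)) (n i : Nat) :
    (((List.range n).reverse.filter (fun j => decide (pvVal grid i j ≠ -1))).map (pvVal grid i))
      = (pvFilt grid n i).reverse := by
  rw [List.filter_reverse, List.map_reverse]
  rfl

lemma pvStep_get2 (grid : List (List Int)) (n m : Nat) (res : List (List Int))
    (hn : 0 < n) (hres : res.length = n) (hrow : ∀ row ∈ res, row.length = n) (hm : m < n) :
    ∀ r c, get2 (pvStep grid n res m) r c =
      if c = m ∧ r ≤ n - 1 ∧ (n - 1) - r < (pvFilt grid n m).length then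
        (pvFilt grid n m).reverse.getD ((n - 1) - r) 0
      else get2 res r c := by
  intro r c
  unfold pvStep
  rw [inner_fold_eq, filt_reverse]
  have hk := pvFilt_len_le grid n m
  rw [write_get2 m ((pvFilt grid n m).reverse) res (n - 1)
    (by rw [List.length_reverse]; omega) (by omega)
    (by intro row hr2; rw [hrow row hr2]; omega) r c]
  rw [List.length_reverse]

lemma pvStep_shape (grid : List (List Int)) (n m : Nat) (res : List (List Int))
    (hn : 0 < n) (hres : res.length = n) (hrow : ∀ row ∈ res, row.length = n) :
    (pvStep grid n res m).length = n ∧ ∀ row ∈ pvStep grid n res m, row.length = n := by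
  unfold pvStep
  rw [inner_fold_eq]
  constructor
  · rw [pvWrite_length]; exact hres
  · exact pvWrite_rows m n _ res (n - 1) (by omega) hrow

lemma rev_getD (l : List Int) (m : Nat) (h : m < l.length) :
    l.reverse.getD m 0 = l.getD (l.length - 1 - m) 0 := by
  rw [List.getD_eq_getElem _ _ (by rw [List.length_reverse]; exact h)]
  rw [List.getD_eq_getElem _ _ (by omega)]
  rw [List.getElem_reverse]

lemma base_inv (grid : List (List Int)) (n : Nat) :
    pvColOK grid n 0 (List.replicate n (List.replicate n (0 : Int))) := by
  refine ⟨by simp, ?_, ?_⟩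
  · intro row hrow
    rw [List.eq_of_mem_replicate hrow]
    simp
  · intro r c
    simp only [Nat.not_lt_zero, if_false, get2]
    simp only [List.getD_eq_getElem?_getD, List.getElem?_replicate]
    split_ifs <;> simp

lemma step_inv (grid : List (List Int)) (n m : Nat) (res : List (List Int))
    (hm : m < n) (h : pvColOK grid n m res) :
    pvColOK grid n (m + 1) (pvStep grid n res m) := by
  obtain ⟨h1, h2, h3⟩ := h
  have hn : 0 < n := by omega
  obtain ⟨s1, s2⟩ := pvStep_shape grid n m res hn h1 h2
  refine ⟨s1, s2, ?_⟩
  intro r c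
  rw [pvStep_get2 grid n m res hn h1 h2 hm r c]
  have hk := pvFilt_len_le grid n m
  by_cases hc : c = m
  · subst hc
    by_cases hcond : r ≤ n - 1 ∧ (n - 1) - r < (pvFilt grid n c).length
    · rw [if_pos ⟨rfl, hcond.1, hcond.2⟩, if_pos (by omega)]
      rw [pvPad_getD, if_pos (by omega)]
      rw [rev_getD _ _ hcond.2]
      congr 1
      omega
    · rw [if_neg (by rintro ⟨-, a, b⟩; exact hcond ⟨a, b⟩), h3 r c, if_neg (by omega),
        if_pos (by omega), pvPad_getD, if_neg (by omega)]
  · rw [if_neg (by tauto), h3 r c]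
    by_cases hcm : c < m
    · rw [if_pos hcm, if_pos (by omega)]
    · rw [if_neg hcm, if_neg (by omega)]

lemma outer_inv (grid : List (List Int)) (n : Nat) :
    ∀ m, m ≤ n → pvColOK grid n m
      ((List.range m).foldl (pvStep grid n) (List.replicate n (List.replicate n (0 : Int)))) := by
  intro m
  induction m with
  | zero => intro _; exact base_inv grid n
  | succ m ih =>
    intro hle
    rw [List.range_succ, List.foldl_append, List.foldl_cons, List.foldl_nil]
    exact step_inv grid n m _ (by omega) (ih (by omega))

lemma colOK_eq_target (grid : List (List Int)) (n : Nat) (res : List (List Int))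
    (h : pvColOK grid n n res) : res = pvTarget grid n := by
  obtain ⟨h1, h2, h3⟩ := h
  apply List.ext_getElem (by simp [pvTarget, h1])
  intro r h1r h2r
  have hr : r < n := by omega
  have hrlen : res[r].length = n := h2 _ (List.getElem_mem h1r)
  apply List.ext_getElem (by simp [pvTarget, hrlen])
  intro c hc1 hc2
  have hc : c < n := by omega
  have e1 : get2 res r c = res[r][c] := by
    unfold get2
    rw [List.getD_eq_getElem _ _ h1r, List.getD_eq_getElem _ _ hc1]
  have e2 := h3 r c
  rw [if_pos hc] at e2
  rw [← e1, e2]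
  simp [pvTarget]

lemma push_grid_alt_eq_target (grid : List (List Int)) :
    push_grid_alt grid = pvTarget grid grid.length := by
  have e : push_grid_alt grid
      = (List.range grid.length).foldl (pvStep grid grid.length)
          (List.replicate grid.length (List.replicate grid.length (0 : Int))) := rfl
  rw [e]
  exact colOK_eq_target grid grid.length _ (outer_inv grid grid.length grid.length le_rfl)

-- ===== VERDICT (by name: the statement is the Claim_ definition above) =====
theorem push_grid_spec : Claim_equal_push_grid := by
  intro grid _ _
  unfold Spec_push_grid
  rw [push_grid_eq_target, push_grid_alt_eq_target]
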